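-- pv_equiv track=rewrite | github.com/vrslev/playbacker | backend/src/playbacker/core/stream.py | convert_channel_map_to_coreaudio_format
-- ===== SOURCE A (Python) =====
-- def convert_channel_map_to_coreaudio_format(
--     map: list[int], channel_limit: int
-- ) -> list[int]:
--     channel_map: dict[int, int] = {0: -1}
--     prev_idx = -1
--
--     for _i in range(channel_limit):
--         idx = _i + 1
--
--         if idx in map:
--             channel_map[idx] = prev_idx + 1
--             prev_idx += 1
--         else:
--             channel_map[idx] = -1
--
--     return list(channel_map.values())
-- ===== SOURCE B (Python) =====
-- def convert_channel_map_to_coreaudio_format(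
--     map: list[int], channel_limit: int
-- ) -> list[int]:
--     present = sorted(set(i for i in map if 1 <= i <= channel_limit))
--     pos = {channel: rank for rank, channel in enumerate(present)}
--     return [pos.get(i, -1) for i in range(max(channel_limit, 0) + 1)]
-- ===== Notes on version B (the rewrite author's own statement) =====
-- stated objective: faster
-- what changed: A scans every slot 1..channel_limit and runs a linear list-membership test per slot while threading a running rank; B filters the channel list to the 1..channel_limit range once, sorts the deduplicated channels, builds a channel-to-rank dictionary from the sorted order, and reads the result off with O(1) lookups over range(max(channel_limit,0)+1).
import Mathlib
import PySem

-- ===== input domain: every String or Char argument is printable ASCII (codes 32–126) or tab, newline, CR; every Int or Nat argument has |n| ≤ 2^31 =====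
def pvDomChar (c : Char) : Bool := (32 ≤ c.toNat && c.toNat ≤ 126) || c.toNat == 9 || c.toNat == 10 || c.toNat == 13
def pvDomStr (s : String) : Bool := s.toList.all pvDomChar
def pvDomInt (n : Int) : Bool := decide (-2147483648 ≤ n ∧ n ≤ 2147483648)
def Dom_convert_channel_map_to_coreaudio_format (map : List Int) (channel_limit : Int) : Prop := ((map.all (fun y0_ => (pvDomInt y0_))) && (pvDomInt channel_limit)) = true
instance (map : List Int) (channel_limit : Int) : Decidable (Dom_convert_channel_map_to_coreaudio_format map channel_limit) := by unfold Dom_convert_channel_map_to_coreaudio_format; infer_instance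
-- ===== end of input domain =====

-- B replaces A's scan of every slot 1..channel_limit with a list-membership test per slot
-- by sorting the set of in-range channels once and reading ranks off a position dictionary
-- (objective: alternative decomposition; same result, proved equal below).


-- ===== PORT A =====
-- literal transliteration of A: dict {0: -1}, prev_idx = -1, loop over range(channel_limit)
def convert_channel_map_to_coreaudio_format (map : List Int) (channel_limit : Int) : List Int :=
  let st := (PySem.List.pyRange 0 channel_limit 1).foldl
    (fun (st : PySem.Dict Int Int × Int) _i =>
      let idx := _i + 1
      if idx ∈ map then (st.1.insert idx (st.2 + 1), st.2 + 1)
      else (st.1.insert idx (-1), st.2))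
    ((PySem.Dict.ofList [(0, -1)] : PySem.Dict Int Int), -1)
  st.1.values

-- ===== PORT B =====
-- literal transliteration of B: sorted set of in-range channels, rank dict, comprehension over range
def convert_channel_map_to_coreaudio_format_alt (map : List Int) (channel_limit : Int) : List Int :=
  let present := PySem.List.sorted
    (PySem.Set.ofList (map.filter (fun i => decide (1 ≤ i) && decide (i ≤ channel_limit))))
    (fun x => x) false
  let pos := (PySem.List.enumerate present 0).foldl
    (fun (d : PySem.Dict Int Int) rc => d.insert rc.2 rc.1) PySem.Dict.empty
  (PySem.List.pyRange 0 (max channel_limit 0 + 1) 1).map (fun i => pos.getD i (-1))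

-- ===== PRECONDITION & SPEC =====
def Spec_convert_channel_map_to_coreaudio_format (map : List Int) (channel_limit : Int) (out : List Int) : Prop := out = convert_channel_map_to_coreaudio_format_alt map channel_limit
instance (map : List Int) (channel_limit : Int) (out : List Int) : Decidable (Spec_convert_channel_map_to_coreaudio_format map channel_limit out) := by unfold Spec_convert_channel_map_to_coreaudio_format; infer_instance

-- ===== CLAIM (what is proved, stated in full; the proofs are below) =====
def Claim_equal_convert_channel_map_to_coreaudio_format : Prop := ∀ (map : List Int) (channel_limit : Int), Dom_convert_channel_map_to_coreaudio_format map channel_limit → Spec_convert_channel_map_to_coreaudio_format map channel_limit (convert_channel_map_to_coreaudio_format map channel_limit)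

-- ===== LEMMAS AND PROOFS =====

-- the in-range channels of `map`, in increasing order, as offsets k (channel k+1)
def pvChans (map : List Int) (L : Nat) : List Int :=
  ((List.range L).filter (fun (k : Nat) => decide (((k : Int) + 1) ∈ map))).map (fun (k : Nat) => ((k : Int) + 1))

-- number of present channels among 1..k
def pvCnt (map : List Int) (k : Nat) : Nat :=
  ((List.range k).filter (fun (j : Nat) => decide (((j : Int) + 1) ∈ map))).length

lemma pvCnt_succ (map : List Int) (k : Nat) :
    pvCnt map (k + 1) = pvCnt map k + (if ((k : Int) + 1) ∈ map then 1 else 0) := by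
  simp [pvCnt, List.range_succ, List.filter_append]
  split_ifs with h <;> simp [h]

-- the canonical value both programs compute
def pvOut (map : List Int) (L : Nat) : List Int :=
  (-1) :: (List.range L).map (fun (k : Nat) => if ((k : Int) + 1) ∈ map then ((pvCnt map k : Nat) : Int) else -1)

lemma A_loop (map : List Int) (L : Nat) :
    (List.map Int.ofNat (List.range L)).foldl
      (fun (st : PySem.Dict Int Int × Int) _i =>
        let idx := _i + 1
        if idx ∈ map then (st.1.insert idx (st.2 + 1), st.2 + 1)
        else (st.1.insert idx (-1), st.2))
      (PySem.Dict.ofList [(0, -1)], -1)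
    = (PySem.Dict.mk ((0, -1) :: (List.range L).map
        (fun (k : Nat) => (((k : Int) + 1), if ((k : Int) + 1) ∈ map then ((pvCnt map k : Nat) : Int) else -1))),
       ((pvCnt map L : Nat) : Int) - 1) := by
  induction L with
  | zero => rfl
  | succ n ih =>
    rw [List.range_succ, List.map_append, List.foldl_append, ih]
    simp only [List.map_cons, List.map_nil, List.foldl_cons, List.foldl_nil]
    have hnc : (PySem.Dict.mk ((0, -1) :: (List.range n).map
        (fun (k : Nat) => (((k : Int) + 1), if ((k : Int) + 1) ∈ map then ((pvCnt map k : Nat) : Int) else -1)))).contains ((n : Int) + 1) = false := by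
      simp only [PySem.Dict.contains_eq_decide_mem_keys, PySem.Dict.keys, decide_eq_false_iff_not]
      simp only [List.map_cons, List.map_map, List.mem_cons, List.mem_map, List.mem_range,
        Function.comp]
      push Not
      constructor
      · omega
      · intro k hk
        omega
    by_cases hm : ((n : Int) + 1) ∈ map
    · simp only [Int.ofNat_eq_natCast, hm, if_pos]
      refine Prod.ext ?_ ?_
      · apply PySem.Dict.ext
        rw [PySem.Dict.items_insert_of_not_contains _ _ hnc]
        simp [hm]
      · simp only [pvCnt_succ, hm, if_pos]
        push_cast
        omega
    · simp only [Int.ofNat_eq_natCast, hm, if_neg, not_false_iff]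
      refine Prod.ext ?_ ?_
      · apply PySem.Dict.ext
        rw [PySem.Dict.items_insert_of_not_contains _ _ hnc]
        simp [hm]
      · simp [pvCnt_succ, hm]

lemma A_eq (map : List Int) (channel_limit : Int) :
    convert_channel_map_to_coreaudio_format map channel_limit = pvOut map channel_limit.toNat := by
  unfold convert_channel_map_to_coreaudio_format
  rw [PySem.List.pyRange_one]
  have h : List.map (fun k : Nat => (0 : Int) + (k : Int)) (List.range (channel_limit - 0).toNat)
      = List.map Int.ofNat (List.range channel_limit.toNat) := by
    simp [Int.ofNat_eq_natCast]
  rw [h, A_loop]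
  simp [pvOut, PySem.Dict.values, List.map_map, Function.comp]

lemma pvChans_pairwise (map : List Int) (L : Nat) : (pvChans map L).Pairwise (· < ·) := by
  refine List.Pairwise.map _ (fun a b (h : a < b) => ?_) (List.Pairwise.filter _ ?_)
  · omega
  · exact List.pairwise_lt_range

lemma present_eq (map : List Int) (channel_limit : Int) :
    PySem.List.sorted
      (PySem.Set.ofList (map.filter (fun i => decide (1 ≤ i) && decide (i ≤ channel_limit))))
      (fun x => x) false = pvChans map channel_limit.toNat := by
  have hpw := pvChans_pairwise map channel_limit.toNat
  apply PySem.List.sorted_eq_of_perm_of_pairwise_lt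
  · rw [List.perm_ext_iff_of_nodup (hpw.imp fun h => ne_of_lt h) (PySem.Set.nodup_ofList _)]
    intro x
    simp only [pvChans, List.mem_map, List.mem_filter, List.mem_range,
      PySem.Set.mem_ofList, Bool.and_eq_true, decide_eq_true_eq]
    constructor
    · rintro ⟨k, ⟨hk, hm⟩, rfl⟩
      exact ⟨hm, by omega, by omega⟩
    · rintro ⟨hm, h1, h2⟩
      refine ⟨(x - 1).toNat, ⟨by omega, ?_⟩, by omega⟩
      have hx : ((x - 1).toNat : Int) + 1 = x := by omega
      rw [hx]; exact hm
  · exact hpw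

lemma pvChans_getElem (map : List Int) (L k : Nat) (hk : k < L) (hm : ((k : Int) + 1) ∈ map) :
    ∃ h : pvCnt map k < (pvChans map L).length,
      (pvChans map L)[pvCnt map k]'h = (k : Int) + 1 := by
  have hsplit : List.range L = List.range k ++ k :: List.map (fun j => (k + 1) + j) (List.range (L - k - 1)) := by
    have h1 : List.range L = List.range k ++ List.map (fun j => k + j) (List.range (L - k)) := by
      conv_lhs => rw [show L = k + (L - k) by omega]
      exact List.range_add
    have h2 : List.range (L - k) = 0 :: List.map Nat.succ (List.range (L - k - 1)) := by
      conv_lhs => rw [show L - k = (L - k - 1) + 1 by omega]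
      exact List.range_succ_eq_map
    rw [h1, h2]
    simp [List.map_map, Function.comp]
    exact fun a _ => by omega
  have hchans : pvChans map L =
      ((List.range k).filter (fun (j : Nat) => decide (((j : Int) + 1) ∈ map))).map (fun (j : Nat) => ((j : Int) + 1))
      ++ ((k : Int) + 1) ::
        ((List.map (fun j => (k + 1) + j) (List.range (L - k - 1))).filter
          (fun (j : Nat) => decide (((j : Int) + 1) ∈ map))).map (fun (j : Nat) => ((j : Int) + 1)) := by
    rw [pvChans, hsplit, List.filter_append, List.map_append, List.filter_cons]
    simp [hm]
  have hlen : (((List.range k).filter (fun (j : Nat) => decide (((j : Int) + 1) ∈ map))).map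
      (fun (j : Nat) => ((j : Int) + 1))).length = pvCnt map k := by
    simp [pvCnt]
  refine ⟨?_, List.getElem_of_append hchans hlen⟩
  rw [hchans]
  simp only [List.length_append, List.length_cons]
  omega

lemma pos_items (map : List Int) (L : Nat) :
    ((PySem.List.enumerate (pvChans map L) 0).foldl
      (fun (d : PySem.Dict Int Int) rc => d.insert rc.2 rc.1) PySem.Dict.empty).items
    = (PySem.List.enumerate (pvChans map L) 0).map (fun rc => (rc.2, rc.1)) := by
  have h := PySem.Dict.items_foldl_insert_fresh (l := PySem.List.enumerate (pvChans map L) 0)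
    (k := Prod.snd) (v := Prod.fst) (d := PySem.Dict.empty)
    (by intro a _; exact PySem.Dict.contains_empty _)
    (by rw [PySem.List.map_snd_enumerate]
        exact ((pvChans_pairwise map L).imp fun h => ne_of_lt h))
  simpa using h

lemma pos_keys (map : List Int) (L : Nat) :
    ((PySem.List.enumerate (pvChans map L) 0).foldl
      (fun (d : PySem.Dict Int Int) rc => d.insert rc.2 rc.1) PySem.Dict.empty).keys
    = pvChans map L := by
  show ((PySem.List.enumerate (pvChans map L) 0).foldl
      (fun (d : PySem.Dict Int Int) rc => d.insert rc.2 rc.1) PySem.Dict.empty).items.map (·.1)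
    = pvChans map L
  rw [pos_items, List.map_map]
  have : ((fun (p : Int × Int) => p.1) ∘ fun (rc : Int × Int) => (rc.2, rc.1)) = Prod.snd := rfl
  rw [this, PySem.List.map_snd_enumerate]

lemma pos_getD_mem (map : List Int) (L k : Nat) (hk : k < L) (hm : ((k : Int) + 1) ∈ map) :
    ((PySem.List.enumerate (pvChans map L) 0).foldl
      (fun (d : PySem.Dict Int Int) rc => d.insert rc.2 rc.1) PySem.Dict.empty).getD ((k : Int) + 1) (-1)
    = ((pvCnt map k : Nat) : Int) := by
  obtain ⟨h, hget⟩ := pvChans_getElem map L k hk hm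
  apply PySem.Dict.getD_of_mem_items
  · rw [pos_items]
    simp only [List.mem_map]
    refine ⟨((pvCnt map k : Int), (k : Int) + 1), ?_, rfl⟩
    rw [PySem.List.mem_enumerate_iff]
    exact ⟨pvCnt map k, h, by simp [hget]⟩
  · rw [pos_keys]
    exact (pvChans_pairwise map L).imp fun h => ne_of_lt h

lemma pos_getD_not_mem (map : List Int) (L : Nat) (x : Int) (hx : x ∉ pvChans map L) :
    ((PySem.List.enumerate (pvChans map L) 0).foldl
      (fun (d : PySem.Dict Int Int) rc => d.insert rc.2 rc.1) PySem.Dict.empty).getD x (-1) = -1 := by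
  apply PySem.Dict.getD_of_not_contains
  rw [PySem.Dict.contains_eq_decide_mem_keys, pos_keys]
  simpa using hx

lemma B_eq (map : List Int) (channel_limit : Int) :
    convert_channel_map_to_coreaudio_format_alt map channel_limit = pvOut map channel_limit.toNat := by
  simp only [convert_channel_map_to_coreaudio_format_alt, present_eq, PySem.List.pyRange_one]
  have hL : (max channel_limit 0 + 1 - 0).toNat = channel_limit.toNat + 1 := by omega
  rw [hL, List.map_map, List.range_succ_eq_map, List.map_cons, List.map_map]
  unfold pvOut
  refine congrArg₂ List.cons ?_ ?_
  · exact pos_getD_not_mem map channel_limit.toNat _ (by simp [pvChans]; omega)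
  · refine List.map_congr_left (fun k hk => ?_)
    rw [List.mem_range] at hk
    by_cases hm : ((k : Int) + 1) ∈ map
    · rw [if_pos hm]
      have := pos_getD_mem map channel_limit.toNat k hk hm
      simpa using this
    · rw [if_neg hm]
      have hnot : ((k : Int) + 1) ∉ pvChans map channel_limit.toNat := by
        simp only [pvChans, List.mem_map, List.mem_filter, List.mem_range, decide_eq_true_eq]
        rintro ⟨j, ⟨_, hj⟩, hje⟩
        exact hm (by rwa [show (j : Int) + 1 = (k : Int) + 1 by omega] at hj)
      have := pos_getD_not_mem map channel_limit.toNat _ hnot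
      simpa using this

-- ===== VERDICT (by name: the statement is the Claim_ definition above) =====
theorem convert_channel_map_to_coreaudio_format_spec : Claim_equal_convert_channel_map_to_coreaudio_format := by
  intro map channel_limit _
  unfold Spec_convert_channel_map_to_coreaudio_format
  rw [A_eq, B_eq]
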